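-- pv_equiv track=rewrite | github.com/Nabil-mrj/adventofcode-2025 | day4/day4_part2.py | solve
-- ===== SOURCE A (Python) =====
-- from collections import deque
--
-- def solve(text):
--     grid = [list(line.rstrip("\n")) for line in text.splitlines() if line.strip()]
--     h = len(grid)
--     w = len(grid[0]) if h else 0
--
--     dirs = [(dr, dc) for dr in (-1, 0, 1) for dc in (-1, 0, 1) if not (dr == 0 and dc == 0)]
--
--     def adj_count(r, c):
--         # Nombre de '@' adjacents
--         cnt = 0
--         for dr, dc in dirs:
--             rr = r + dr
--             cc = c + dc
--             if 0 <= rr < h and 0 <= cc < w and grid[rr][cc] == "@":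
--                 cnt += 1
--         return cnt
--
--     q = deque()
--     inq = [[False] * w for _ in range(h)]
--
--     # Tous les @ en file
--     for r in range(h):
--         for c in range(w):
--             if grid[r][c] == "@":
--                 q.append((r, c))
--                 inq[r][c] = True
--
--     removed = 0
--
--     while q:
--         r, c = q.popleft()
--         inq[r][c] = False
--
--         if grid[r][c] != "@":
--             continue
--
--         # Retrait si < 4 voisins
--         if adj_count(r, c) < 4:
--             grid[r][c] = "."
--             removed += 1
--
--             for dr, dc in dirs:
--                 rr = r + dr
--                 cc = c + dc
--                 if 0 <= rr < h and 0 <= cc < w and grid[rr][cc] == "@":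
--                     if not inq[rr][cc]:
--                         q.append((rr, cc))
--                         inq[rr][cc] = True
--
--     return removed
-- ===== SOURCE B (Python) =====
-- def solve(text):
--     grid = [list(line.rstrip("\n")) for line in text.splitlines() if line.strip()]
--     h = len(grid)
--     w = len(grid[0]) if h else 0
--
--     def neighbors(r, c):
--         n = 0
--         for rr in range(r - 1, r + 2):
--             for cc in range(c - 1, c + 2):
--                 if (rr, cc) != (r, c) and 0 <= rr < h and 0 <= cc < w and grid[rr][cc] == "@":
--                     n += 1
--         return n
--
--     removed = 0
--     changed = True
--     while changed:
--         changed = False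
--         for r in range(h):
--             for c in range(w):
--                 if grid[r][c] == "@" and neighbors(r, c) < 4:
--                     grid[r][c] = "."
--                     removed += 1
--                     changed = True
--     return removed
-- ===== Notes on version B (the rewrite author's own statement) =====
-- stated objective: simpler
-- what changed: Replaced A's deque worklist with inq de-duplication flags by a plain fixed-point sweep: repeatedly pass over the whole grid removing every '@' cell with fewer than 4 '@' neighbours until a full pass removes nothing; equal by confluence of the peeling process.
import Mathlib
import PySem

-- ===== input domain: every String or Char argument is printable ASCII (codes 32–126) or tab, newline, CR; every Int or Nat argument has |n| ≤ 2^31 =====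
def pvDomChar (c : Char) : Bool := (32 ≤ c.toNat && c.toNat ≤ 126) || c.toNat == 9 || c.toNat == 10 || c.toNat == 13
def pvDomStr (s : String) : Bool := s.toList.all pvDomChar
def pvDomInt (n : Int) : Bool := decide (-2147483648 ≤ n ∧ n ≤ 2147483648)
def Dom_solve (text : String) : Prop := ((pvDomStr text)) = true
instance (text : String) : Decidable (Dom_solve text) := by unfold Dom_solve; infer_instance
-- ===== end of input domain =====

-- B replaces A's deque+inq worklist by a plain fixed-point sweep (repeat full grid passes until a
-- pass removes nothing); same result, simpler bookkeeping ("simpler"; not claimed faster).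

-- ===== PORT A =====
-- shared cell helpers: x[r][c] read / write (both Pythons index rows then columns the same way)
def pvGet2 {α : Type} (m : List (List α)) (r c : Int) (d : α) : α :=
  PySem.List.pyGetD (PySem.List.pyGetD m r []) c d

def pvSet2 {α : Type} (m : List (List α)) (r c : Int) (v : α) : List (List α) :=
  PySem.List.pySetD m r (PySem.List.pySetD (PySem.List.pyGetD m r []) c v)

-- grid = [list(line.rstrip("\n")) for line in text.splitlines() if line.strip()]
-- (splitlines output never contains '\n', so rstrip("\n") is the identity here; list(line) is the char list)
def pvGrid (text : String) : List (List Char) :=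
  (PySem.Chars.splitlines text.toList).filter (fun l => !(PySem.Chars.strip l).isEmpty)

def pvDirs : List (Int × Int) :=
  [(-1,-1),(-1,0),(-1,1),(0,-1),(0,1),(1,-1),(1,0),(1,1)]

-- adj_count: fold over dirs, counting in-bounds '@' neighbours
def pvAdj (g : List (List Char)) (h w r c : Int) : Int :=
  pvDirs.foldl (fun cnt d =>
    if 0 ≤ r + d.1 ∧ r + d.1 < h ∧ 0 ≤ c + d.2 ∧ c + d.2 < w ∧
        pvGet2 g (r + d.1) (c + d.2) '.' = '@' then cnt + 1 else cnt) 0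

-- the fill loop's appends to q, in the same row-major order
def pvInitQ (g : List (List Char)) (h w : Int) : List (Int × Int) :=
  (PySem.List.pyRange 0 h 1).flatMap (fun r =>
    (PySem.List.pyRange 0 w 1).filterMap (fun c =>
      if pvGet2 g r c '.' = '@' then some (r, c) else none))

-- inq after the fill loop: True exactly at the '@' cells
def pvInitInq (g : List (List Char)) (h w : Int) : List (List Bool) :=
  (PySem.List.pyRange 0 h 1).map (fun r =>
    (PySem.List.pyRange 0 w 1).map (fun c => pvGet2 g r c '.' == '@'))

-- body of the neighbour-push loop: append (rr,cc) to q unless already flagged in inq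
def pvPushD (h w r c : Int) (g1 : List (List Char))
    (st : List (Int × Int) × List (List Bool)) (d : Int × Int) :
    List (Int × Int) × List (List Bool) :=
  if 0 ≤ r + d.1 ∧ r + d.1 < h ∧ 0 ≤ c + d.2 ∧ c + d.2 < w ∧
      pvGet2 g1 (r + d.1) (c + d.2) '.' = '@' then
    if pvGet2 st.2 (r + d.1) (c + d.2) false = false then
      (st.1 ++ [(r + d.1, c + d.2)], pvSet2 st.2 (r + d.1) (c + d.2) true)
    else st
  else st

-- the while-q loop (fuel only guards termination; it is always sufficient, see the proofs)
def pvLoop (h w : Int) : Nat → List (List Char) → List (Int × Int) → List (List Bool) → Int → Int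
  | 0, _, _, _, removed => removed
  | _ + 1, _, [], _, removed => removed
  | fuel + 1, g, (r, c) :: q', inq, removed =>
    let inq1 := pvSet2 inq r c false
    if pvGet2 g r c '.' ≠ '@' then pvLoop h w fuel g q' inq1 removed
    else if pvAdj g h w r c < 4 then
      let g1 := pvSet2 g r c '.'
      let st := pvDirs.foldl (pvPushD h w r c g1) (q', inq1)
      pvLoop h w fuel g1 st.1 st.2 (removed + 1)
    else pvLoop h w fuel g q' inq1 removed

def solve (text : String) : Int :=
  let g := pvGrid text
  let h := PySem.List.len g
  let w := if h ≠ 0 then PySem.List.len (PySem.List.pyGetD g 0 []) else 0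
  let q := pvInitQ g h w
  pvLoop h w (10 * q.length + 1) g q (pvInitInq g h w) 0

-- ===== PORT B =====
def altGrid (text : String) : List (List Char) :=
  (PySem.Chars.splitlines text.toList).filter (fun l => !(PySem.Chars.strip l).isEmpty)

-- neighbors: scan the 3x3 window around (r,c), skipping the centre
def altNbs (g : List (List Char)) (h w r c : Int) : Int :=
  (PySem.List.pyRange (r - 1) (r + 2) 1).foldl (fun n rr =>
    (PySem.List.pyRange (c - 1) (c + 2) 1).foldl (fun n cc =>
      if ¬(rr = r ∧ cc = c) ∧ 0 ≤ rr ∧ rr < h ∧ 0 ≤ cc ∧ cc < w ∧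
          pvGet2 g rr cc '.' = '@' then n + 1 else n) n) 0

-- inner `for c in range(w)` of one pass; state = (grid, removed, changed)
def altCols (h w r : Int) : List Int → List (List Char) × Int × Bool → List (List Char) × Int × Bool
  | [], st => st
  | c :: cs, (g, removed, changed) =>
    if pvGet2 g r c '.' = '@' ∧ altNbs g h w r c < 4 then
      altCols h w r cs (pvSet2 g r c '.', removed + 1, true)
    else altCols h w r cs (g, removed, changed)

-- outer `for r in range(h)` of one pass
def altRows (h w : Int) : List Int → List (List Char) × Int × Bool → List (List Char) × Int × Bool
  | [], st => st
  | r :: rs, st => altRows h w rs (altCols h w r (PySem.List.pyRange 0 w 1) st)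

-- `while changed` (fuel only guards termination; h*w+1 passes always suffice, see the proofs)
def altLoop (h w : Int) : Nat → List (List Char) → Int → Int
  | 0, _, removed => removed
  | fuel + 1, g, removed =>
    match altRows h w (PySem.List.pyRange 0 h 1) (g, removed, false) with
    | (g', removed', changed) => if changed then altLoop h w fuel g' removed' else removed'

def solve_alt (text : String) : Int :=
  let g := altGrid text
  let h := PySem.List.len g
  let w := if h ≠ 0 then PySem.List.len (PySem.List.pyGetD g 0 []) else 0
  altLoop h w (h.toNat * w.toNat + 1) g 0

-- ===== PRECONDITION & SPEC =====
-- Pre_ excludes ragged grids whose later rows are shorter than row 0: there A raises IndexError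
-- (grid[r][c] with c up to len(grid[0])-1).  Rows longer than row 0 are fine for A and admitted.
def Pre_solve (text : String) : Prop :=
  ∀ row ∈ (PySem.Chars.splitlines text.toList).filter (fun l => !(PySem.Chars.strip l).isEmpty),
    (((PySem.Chars.splitlines text.toList).filter
        (fun l => !(PySem.Chars.strip l).isEmpty)).headD []).length ≤ row.length

instance (text : String) : Decidable (Pre_solve text) := by unfold Pre_solve; infer_instance

def pvWitness_solve : String := "@@@\n@@@\n@@@"

def Spec_solve (text : String) (out : Int) : Prop := out = solve_alt text
instance (text : String) (out : Int) : Decidable (Spec_solve text out) := by unfold Spec_solve; infer_instance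

-- ===== CLAIM (what is proved, stated in full; the proofs are below) =====
def Claim_equal_solve : Prop := ∀ (text : String), Dom_solve text → Pre_solve text → Spec_solve text (solve text)

-- ===== LEMMAS AND PROOFS =====

-- ---------- abstract removal system ----------

-- shape: h rows, every row at least w wide
def Sh2 {α : Type} (h w : Int) (m : List (List α)) : Prop :=
  m.length = h.toNat ∧ ∀ row ∈ m, w.toNat ≤ row.length

-- cell (r,c) is removable
def RemP (h w : Int) (g : List (List Char)) (r c : Int) : Prop :=
  0 ≤ r ∧ r < h ∧ 0 ≤ c ∧ c < w ∧ pvGet2 g r c '.' = '@' ∧ pvAdj g h w r c < 4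

def StepG (h w : Int) (g g' : List (List Char)) : Prop :=
  ∃ r c, RemP h w g r c ∧ g' = pvSet2 g r c '.'

def NormalG (h w : Int) (g : List (List Char)) : Prop := ∀ r c, ¬ RemP h w g r c

def ReachG (h w : Int) : List (List Char) → List (List Char) → Prop :=
  Relation.ReflTransGen (StepG h w)

def cellsL (h w : Int) : List (Int × Int) :=
  (List.range h.toNat).flatMap (fun r =>
    (List.range w.toNat).map (fun c => (Int.ofNat r, Int.ofNat c)))

def atN (h w : Int) (g : List (List Char)) : Nat :=
  (cellsL h w).countP (fun p => pvGet2 g p.1 p.2 '.' == '@')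

-- ---------- basic grid lemmas ----------

lemma length_set2 {α : Type} (m : List (List α)) (r c : Int) (v : α) :
    (pvSet2 m r c v).length = m.length := by
  simp [pvSet2, PySem.List.length_pySetD]

lemma sh2_set2 {α : Type} {h w : Int} {m : List (List α)} (hs : Sh2 h w m)
    (r c : Int) (v : α) (hr : 0 ≤ r) (hr2 : r < h) : Sh2 h w (pvSet2 m r c v) := by
  obtain ⟨hl, hrow⟩ := hs
  constructor
  · rw [length_set2]; exact hl
  · intro row hmem
    unfold pvSet2 at hmem
    rw [PySem.List.pySetD_of_nonneg _ _ hr] at hmem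
    rcases List.mem_or_eq_of_mem_set hmem with h1 | h1
    · exact hrow _ h1
    · subst h1
      rw [PySem.List.length_pySetD]
      refine hrow _ (PySem.List.pyGetD_mem m [] ?_)
      constructor <;> omega

lemma get2_set2 {α : Type} {h w : Int} {m : List (List α)} (hs : Sh2 h w m)
    {r c r' c' : Int} (v d : α)
    (hr : 0 ≤ r) (hr2 : r < h) (hc : 0 ≤ c) (hc2 : c < w)
    (hr' : 0 ≤ r') (hr2' : r' < h) (hc' : 0 ≤ c') (hc2' : c' < w) :
    pvGet2 (pvSet2 m r c v) r' c' d = if r' = r ∧ c' = c then v else pvGet2 m r' c' d := by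
  obtain ⟨hl, hrow⟩ := hs
  have hrl : r.toNat < m.length := by omega
  have hrl' : r'.toNat < m.length := by omega
  have hcl : ∀ i (hi : i < m.length), c.toNat < m[i].length ∧ c'.toNat < m[i].length := by
    intro i hi
    have := hrow m[i] (List.getElem_mem hi)
    omega
  have hrowA : PySem.List.pyGetD m r ([] : List α) = m[r.toNat] :=
    PySem.List.pyGetD_eq_getElem m [] hr (by omega)
  have hrowA' : PySem.List.pyGetD m r' ([] : List α) = m[r'.toNat] :=
    PySem.List.pyGetD_eq_getElem m [] hr' (by omega)
  unfold pvGet2 pvSet2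
  rw [hrowA, PySem.List.pySetD_of_nonneg _ _ hc, PySem.List.pySetD_of_nonneg _ _ hr]
  rw [PySem.List.pyGetD_eq_getElem _ [] hr' (by simp only [List.length_set]; omega)]
  rw [List.getElem_set (by simp only [List.length_set]; omega)]
  by_cases hrr : r.toNat = r'.toNat
  · rw [if_pos hrr]
    rw [PySem.List.pyGetD_eq_getElem _ d hc'
      (by simp only [List.length_set]; have := (hcl _ hrl).2; omega)]
    rw [List.getElem_set (by simp only [List.length_set]; have := (hcl _ hrl).2; omega)]
    by_cases hcc : c.toNat = c'.toNat
    · rw [if_pos hcc]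
      have : r' = r ∧ c' = c := by omega
      simp [this]
    · rw [if_neg hcc, hrowA',
        PySem.List.pyGetD_eq_getElem _ d hc' (by have := (hcl _ hrl').2; omega)]
      have hne : ¬ (r' = r ∧ c' = c) := by omega
      rw [if_neg hne]
      simp only [hrr]
  · rw [if_neg hrr, hrowA',
      PySem.List.pyGetD_eq_getElem _ d hc' (by have := (hcl _ hrl').2; omega)]
    have hne : ¬ (r' = r ∧ c' = c) := by omega
    rw [if_neg hne]

lemma set2_comm {α : Type} (m : List (List α)) (r c r' c' : Int) (v : α)
    (hr : 0 ≤ r) (hc : 0 ≤ c) (hr' : 0 ≤ r') (hc' : 0 ≤ c')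
    (hrl : r.toNat < m.length) (hrl' : r'.toNat < m.length) :
    pvSet2 (pvSet2 m r c v) r' c' v = pvSet2 (pvSet2 m r' c' v) r c v := by
  have hrowA : PySem.List.pyGetD m r ([] : List α) = m[r.toNat] :=
    PySem.List.pyGetD_eq_getElem m [] hr (by omega)
  have hrowA' : PySem.List.pyGetD m r' ([] : List α) = m[r'.toNat] :=
    PySem.List.pyGetD_eq_getElem m [] hr' (by omega)
  have R1 : ∀ (xs : List (List α)) (vv : List α), PySem.List.pySetD xs r vv = xs.set r.toNat vv :=
    fun xs vv => PySem.List.pySetD_of_nonneg xs vv hr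
  have R2 : ∀ (xs : List (List α)) (vv : List α), PySem.List.pySetD xs r' vv = xs.set r'.toNat vv :=
    fun xs vv => PySem.List.pySetD_of_nonneg xs vv hr'
  have C1 : ∀ (xs : List α) (vv : α), PySem.List.pySetD xs c vv = xs.set c.toNat vv :=
    fun xs vv => PySem.List.pySetD_of_nonneg xs vv hc
  have C2 : ∀ (xs : List α) (vv : α), PySem.List.pySetD xs c' vv = xs.set c'.toNat vv :=
    fun xs vv => PySem.List.pySetD_of_nonneg xs vv hc'
  unfold pvSet2
  simp only [R1, R2, C1, C2, hrowA, hrowA']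
  have hXA : PySem.List.pyGetD (m.set r.toNat ((m[r.toNat]'hrl).set c.toNat v)) r'
      ([] : List α) = (m.set r.toNat ((m[r.toNat]'hrl).set c.toNat v))[r'.toNat]'(by
        simp only [List.length_set]; omega) :=
    PySem.List.pyGetD_eq_getElem _ [] hr' (by simp only [List.length_set]; omega)
  have hXB : PySem.List.pyGetD (m.set r'.toNat ((m[r'.toNat]'hrl').set c'.toNat v)) r
      ([] : List α) = (m.set r'.toNat ((m[r'.toNat]'hrl').set c'.toNat v))[r.toNat]'(by
        simp only [List.length_set]; omega) :=
    PySem.List.pyGetD_eq_getElem _ [] hr (by simp only [List.length_set]; omega)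
  rw [hXA, hXB]
  rw [List.getElem_set (by simp only [List.length_set]; omega),
    List.getElem_set (by simp only [List.length_set]; omega)]
  by_cases hrr : r.toNat = r'.toNat
  · rw [if_pos hrr, if_pos hrr.symm]
    simp only [hrr]
    rw [List.set_set, List.set_set]
    by_cases hcc : c.toNat = c'.toNat
    · simp only [hcc, List.set_set]
    · rw [List.set_comm _ _ hcc]
  · rw [if_neg hrr, if_neg (fun hh => hrr hh.symm)]
    exact List.set_comm _ _ hrr

-- ---------- adjacency lemmas ----------

lemma pvAdj_eq_countP (g : List (List Char)) (h w r c : Int) :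
    pvAdj g h w r c = (List.countP (fun d => decide (0 ≤ r + d.1 ∧ r + d.1 < h ∧ 0 ≤ c + d.2 ∧
      c + d.2 < w ∧ pvGet2 g (r + d.1) (c + d.2) '.' = '@')) pvDirs : Int) := by
  unfold pvAdj
  rw [PySem.List.foldl_ite_add_one]
  simp

lemma adj_mono {h w : Int} {g : List (List Char)} (hs : Sh2 h w g) {r0 c0 : Int}
    (hr0 : 0 ≤ r0) (hr02 : r0 < h) (hc0 : 0 ≤ c0) (hc02 : c0 < w) (r c : Int) :
    pvAdj (pvSet2 g r0 c0 '.') h w r c ≤ pvAdj g h w r c := by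
  rw [pvAdj_eq_countP, pvAdj_eq_countP]
  have := @List.countP_mono_left _
    (fun d => decide (0 ≤ r + d.1 ∧ r + d.1 < h ∧ 0 ≤ c + d.2 ∧ c + d.2 < w ∧
      pvGet2 (pvSet2 g r0 c0 '.') (r + d.1) (c + d.2) '.' = '@'))
    (fun d => decide (0 ≤ r + d.1 ∧ r + d.1 < h ∧ 0 ≤ c + d.2 ∧ c + d.2 < w ∧
      pvGet2 g (r + d.1) (c + d.2) '.' = '@')) pvDirs ?_
  · exact_mod_cast this
  · intro d _ hd
    simp only [decide_eq_true_eq] at hd ⊢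
    obtain ⟨h1, h2, h3, h4, h5⟩ := hd
    refine ⟨h1, h2, h3, h4, ?_⟩
    rw [get2_set2 hs '.' '.' hr0 hr02 hc0 hc02 h1 h2 h3 h4] at h5
    by_cases he : r + d.1 = r0 ∧ c + d.2 = c0
    · simp [he] at h5
    · simpa [he] using h5

lemma adj_congr_far {h w : Int} {g : List (List Char)} (hs : Sh2 h w g) {r0 c0 : Int}
    (hr0 : 0 ≤ r0) (hr02 : r0 < h) (hc0 : 0 ≤ c0) (hc02 : c0 < w) (r c : Int)
    (hfar : ∀ d ∈ pvDirs, (r + d.1, c + d.2) ≠ (r0, c0)) :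
    pvAdj (pvSet2 g r0 c0 '.') h w r c = pvAdj g h w r c := by
  rw [pvAdj_eq_countP, pvAdj_eq_countP]
  congr 1
  apply List.countP_congr
  intro d hd
  simp only [decide_eq_true_eq]
  constructor
  · rintro ⟨h1, h2, h3, h4, h5⟩
    refine ⟨h1, h2, h3, h4, ?_⟩
    rw [get2_set2 hs '.' '.' hr0 hr02 hc0 hc02 h1 h2 h3 h4] at h5
    by_cases he : r + d.1 = r0 ∧ c + d.2 = c0
    · simp [he] at h5
    · simpa [he] using h5
  · rintro ⟨h1, h2, h3, h4, h5⟩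
    refine ⟨h1, h2, h3, h4, ?_⟩
    rw [get2_set2 hs '.' '.' hr0 hr02 hc0 hc02 h1 h2 h3 h4]
    have he : ¬ (r + d.1 = r0 ∧ c + d.2 = c0) := by
      intro he
      exact hfar d hd (by simp [he.1, he.2])
    simpa [he] using h5

lemma remP_rm {h w : Int} {g : List (List Char)} (hs : Sh2 h w g) {r0 c0 r c : Int}
    (h1 : RemP h w g r0 c0) (h2 : RemP h w g r c) (hne : ¬(r = r0 ∧ c = c0)) :
    RemP h w (pvSet2 g r0 c0 '.') r c := by
  obtain ⟨a1, a2, a3, a4, a5, a6⟩ := h1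
  obtain ⟨b1, b2, b3, b4, b5, b6⟩ := h2
  refine ⟨b1, b2, b3, b4, ?_, ?_⟩
  · rw [get2_set2 hs '.' '.' a1 a2 a3 a4 b1 b2 b3 b4]
    simp [hne, b5]
  · calc pvAdj (pvSet2 g r0 c0 '.') h w r c ≤ pvAdj g h w r c :=
          adj_mono hs a1 a2 a3 a4 r c
      _ < 4 := b6

-- ---------- counting lemmas ----------

lemma mem_cellsL {h w : Int} {p : Int × Int} :
    p ∈ cellsL h w ↔ 0 ≤ p.1 ∧ p.1 < h ∧ 0 ≤ p.2 ∧ p.2 < w := by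
  obtain ⟨x, y⟩ := p
  unfold cellsL
  simp only [List.mem_flatMap, List.mem_map, List.mem_range]
  constructor
  · rintro ⟨a, ha, b, hb, he⟩
    have h1 := congrArg Prod.fst he
    have h2 := congrArg Prod.snd he
    simp [Int.ofNat_eq_natCast] at h1 h2
    omega
  · rintro ⟨h1, h2, h3, h4⟩
    refine ⟨x.toNat, by omega, y.toNat, by omega, ?_⟩
    simp [Int.ofNat_eq_natCast, Prod.ext_iff]
    omega

lemma nodup_cellsL (h w : Int) : (cellsL h w).Nodup := by
  unfold cellsL
  rw [List.nodup_flatMap]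
  constructor
  · intro r _
    refine List.Nodup.map (fun a b hab => ?_) List.nodup_range
    have := congrArg Prod.snd hab
    simpa [Int.ofNat_eq_natCast] using this
  · refine List.Pairwise.imp ?_ List.pairwise_lt_range
    intro a b hab
    simp only [Function.onFun, List.disjoint_left]
    intro p hp hq
    simp only [List.mem_map] at hp hq
    obtain ⟨x, _, rfl⟩ := hp
    obtain ⟨y, _, hy⟩ := hq
    have h1 := congrArg Prod.fst hy
    simp [Int.ofNat_eq_natCast] at h1
    omega

lemma length_cellsL (h w : Int) : (cellsL h w).length = h.toNat * w.toNat := by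
  unfold cellsL
  rw [List.length_flatMap]
  simp

lemma countP_sub_one {α : Type} {L : List α} {p q : α → Bool} {x : α}
    (hn : L.Nodup) (hx : x ∈ L) (hp : p x = true) (hq : q x = false)
    (hco : ∀ y ∈ L, y ≠ x → p y = q y) : L.countP p = L.countP q + 1 := by
  induction L with
  | nil => simp at hx
  | cons a L ih =>
    rcases List.mem_cons.mp hx with rfl | hx'
    · have hnotin : x ∉ L := (List.nodup_cons.mp hn).1
      rw [List.countP_cons, List.countP_cons, hp, hq]
      have heq : L.countP p = L.countP q := by
        apply List.countP_congr
        intro y hy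
        have : y ≠ x := fun he => hnotin (he ▸ hy)
        simp [hco y (List.mem_cons_of_mem _ hy) this]
      simp [heq]
    · have hax : a ≠ x := fun he => (List.nodup_cons.mp hn).1 (he ▸ hx')
      have := ih (List.nodup_cons.mp hn).2 hx'
        (fun y hy hyx => hco y (List.mem_cons_of_mem _ hy) hyx)
      rw [List.countP_cons, List.countP_cons, hco a (List.mem_cons_self) hax, this]
      omega

lemma count_rm {h w : Int} {g : List (List Char)} (hs : Sh2 h w g) {r c : Int}
    (hr : 0 ≤ r) (hr2 : r < h) (hc : 0 ≤ c) (hc2 : c < w)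
    (hat : pvGet2 g r c '.' = '@') :
    atN h w (pvSet2 g r c '.') + 1 = atN h w g := by
  unfold atN
  have := countP_sub_one (L := cellsL h w)
    (p := fun p => pvGet2 g p.1 p.2 '.' == '@')
    (q := fun p => pvGet2 (pvSet2 g r c '.') p.1 p.2 '.' == '@') (x := (r, c))
    (nodup_cellsL h w) (mem_cellsL.mpr ⟨hr, hr2, hc, hc2⟩) (by simpa using hat) ?_ ?_
  · omega
  · have : pvGet2 (pvSet2 g r c '.') r c '.' = '.' := by
      rw [get2_set2 hs '.' '.' hr hr2 hc hc2 hr hr2 hc hc2]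
      simp
    simp [this]
  · intro y hy hyx
    obtain ⟨y1, y2, y3, y4⟩ := mem_cellsL.mp hy
    show (pvGet2 g y.1 y.2 '.' == '@') = (pvGet2 (pvSet2 g r c '.') y.1 y.2 '.' == '@')
    rw [get2_set2 hs '.' '.' hr hr2 hc hc2 y1 y2 y3 y4]
    have : ¬ (y.1 = r ∧ y.2 = c) := by
      intro hh
      exact hyx (Prod.ext hh.1 hh.2)
    simp [this]

lemma count_le (h w : Int) (g : List (List Char)) : atN h w g ≤ h.toNat * w.toNat := by
  calc atN h w g ≤ (cellsL h w).length := List.countP_le_length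
    _ = h.toNat * w.toNat := length_cellsL h w

lemma atN_pos_of_rem {h w : Int} {g : List (List Char)} {r c : Int}
    (h1 : RemP h w g r c) : 1 ≤ atN h w g := by
  obtain ⟨a1, a2, a3, a4, a5, _⟩ := h1
  unfold atN
  rw [Nat.succ_le_iff, List.countP_pos_iff]
  exact ⟨(r, c), mem_cellsL.mpr ⟨a1, a2, a3, a4⟩, by simpa using a5⟩

lemma sh2_step {h w : Int} {g g' : List (List Char)} (hs : Sh2 h w g)
    (hstep : StepG h w g g') : Sh2 h w g' := by
  obtain ⟨r, c, hrem, rfl⟩ := hstep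
  exact sh2_set2 hs r c '.' hrem.1 hrem.2.1

lemma count_step {h w : Int} {g g' : List (List Char)} (hs : Sh2 h w g)
    (hstep : StepG h w g g') : atN h w g' + 1 = atN h w g := by
  obtain ⟨r, c, hrem, rfl⟩ := hstep
  exact count_rm hs hrem.1 hrem.2.1 hrem.2.2.1 hrem.2.2.2.1 hrem.2.2.2.2.1

lemma sh2_reach {h w : Int} {g n : List (List Char)} (hr : ReachG h w g n)
    (hs : Sh2 h w g) : Sh2 h w n := by
  induction hr with
  | refl => exact hs
  | tail _ hstep ih => exact sh2_step ih hstep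

lemma count_reach {h w : Int} {g n : List (List Char)} (hr : ReachG h w g n)
    (hs : Sh2 h w g) : atN h w n ≤ atN h w g := by
  induction hr with
  | refl => exact le_refl _
  | tail hr1 hstep ih =>
    have := count_step (sh2_reach hr1 hs) hstep
    omega

-- ---------- confluence: unique normal form ----------

lemma nf_exists (h w : Int) (N : Nat) : ∀ g, Sh2 h w g → atN h w g ≤ N →
    ∃ n, ReachG h w g n ∧ NormalG h w n := by
  induction N with
  | zero =>
    intro g hs hle
    refine ⟨g, Relation.ReflTransGen.refl, ?_⟩
    intro r c hrem
    have := atN_pos_of_rem hrem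
    omega
  | succ N ih =>
    intro g hs hle
    by_cases hn : NormalG h w g
    · exact ⟨g, Relation.ReflTransGen.refl, hn⟩
    · unfold NormalG at hn
      push Not at hn
      obtain ⟨r, c, hrem⟩ := hn
      have hstep : StepG h w g (pvSet2 g r c '.') := ⟨r, c, hrem, rfl⟩
      have hs' := sh2_step hs hstep
      have hcnt := count_step hs hstep
      obtain ⟨n, hr1, hr2⟩ := ih (pvSet2 g r c '.') hs' (by omega)
      exact ⟨n, Relation.ReflTransGen.head hstep hr1, hr2⟩

lemma dirs_symm : ∀ d ∈ pvDirs, (-d.1, -d.2) ∈ pvDirs := by decide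

lemma nf_unique (h w : Int) (N : Nat) : ∀ g n1 n2, Sh2 h w g → atN h w g ≤ N →
    ReachG h w g n1 → NormalG h w n1 → ReachG h w g n2 → NormalG h w n2 → n1 = n2 := by
  induction N with
  | zero =>
    intro g n1 n2 hs hle h1 hn1 h2 hn2
    have hnog : NormalG h w g := fun r c hrem => by
      have := atN_pos_of_rem hrem; omega
    have e1 : g = n1 := by
      rcases Relation.ReflTransGen.cases_head h1 with rfl | ⟨b, hb, _⟩
      · rfl
      · obtain ⟨r, c, hrem, _⟩ := hb
        exact absurd hrem (hnog r c)
    have e2 : g = n2 := by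
      rcases Relation.ReflTransGen.cases_head h2 with rfl | ⟨b, hb, _⟩
      · rfl
      · obtain ⟨r, c, hrem, _⟩ := hb
        exact absurd hrem (hnog r c)
    rw [← e1, ← e2]
  | succ N ih =>
    intro g n1 n2 hs hle h1 hn1 h2 hn2
    rcases Relation.ReflTransGen.cases_head h1 with rfl | ⟨a, ha, ha1⟩
    · rcases Relation.ReflTransGen.cases_head h2 with rfl | ⟨b, hb, _⟩
      · rfl
      · obtain ⟨r, c, hrem, _⟩ := hb
        exact absurd hrem (hn1 r c)
    · rcases Relation.ReflTransGen.cases_head h2 with rfl | ⟨b, hb, hb2⟩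
      · obtain ⟨r, c, hrem, _⟩ := ha
        exact absurd hrem (hn2 r c)
      · obtain ⟨r, c, hrA, haeq⟩ := ha
        obtain ⟨r', c', hrB, hbeq⟩ := hb
        have hstepA : StepG h w g a := ⟨r, c, hrA, haeq⟩
        have hstepB : StepG h w g b := ⟨r', c', hrB, hbeq⟩
        have hsA := sh2_step hs hstepA
        have hsB := sh2_step hs hstepB
        have cA := count_step hs hstepA
        have cB := count_step hs hstepB
        by_cases hxy : r = r' ∧ c = c'
        · have hab : a = b := by rw [haeq, hbeq, hxy.1, hxy.2]
          exact ih a n1 n2 hsA (by omega) ha1 hn1 (hab ▸ hb2) hn2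
        · have hrA' : RemP h w a r' c' := by
            rw [haeq]; exact remP_rm hs hrA hrB (by omega)
          have hrB' : RemP h w b r c := by
            rw [hbeq]; exact remP_rm hs hrB hrA (by omega)
          have hcomm : pvSet2 a r' c' '.' = pvSet2 b r c '.' := by
            rw [haeq, hbeq]
            exact set2_comm g r c r' c' '.' hrA.1 hrA.2.2.1 hrB.1 hrB.2.2.1
              (by have := hs.1; have := hrA.2.1; have := hrA.1; omega)
              (by have := hs.1; have := hrB.2.1; have := hrB.1; omega)
          have hstepAd : StepG h w a (pvSet2 a r' c' '.') := ⟨r', c', hrA', rfl⟩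
          have hstepBd : StepG h w b (pvSet2 b r c '.') := ⟨r, c, hrB', rfl⟩
          obtain ⟨n, hdn, hdnorm⟩ := nf_exists h w (atN h w (pvSet2 a r' c' '.'))
            (pvSet2 a r' c' '.') (sh2_step hsA hstepAd) (le_refl _)
          have h1n : ReachG h w a n := Relation.ReflTransGen.head hstepAd hdn
          have h2n : ReachG h w b n := Relation.ReflTransGen.head hstepBd (hcomm ▸ hdn)
          have e1 : n1 = n := ih a n1 n hsA (by omega) ha1 hn1 h1n hdnorm
          have e2 : n2 = n := ih b n2 n hsB (by omega) hb2 hn2 h2n hdnorm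
          rw [e1, e2]

-- ---------- port A: worklist loop reaches the normal form ----------

def QInv (h w : Int) (g : List (List Char)) (q : List (Int × Int)) (inq : List (List Bool)) : Prop :=
  q.Nodup ∧
  (∀ p ∈ q, 0 ≤ p.1 ∧ p.1 < h ∧ 0 ≤ p.2 ∧ p.2 < w) ∧
  (∀ r c, 0 ≤ r → r < h → 0 ≤ c → c < w → (pvGet2 inq r c false = true ↔ (r, c) ∈ q)) ∧
  (∀ r c, RemP h w g r c → (r, c) ∈ q)

lemma push_fold {h w r c : Int} (g1 : List (List Char)) :
    ∀ (ds : List (Int × Int)) (q : List (Int × Int)) (inq : List (List Bool)),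
    (∀ d ∈ ds, d ∈ pvDirs) →
    q.Nodup → (∀ p ∈ q, 0 ≤ p.1 ∧ p.1 < h ∧ 0 ≤ p.2 ∧ p.2 < w) → Sh2 h w inq →
    (∀ r' c', 0 ≤ r' → r' < h → 0 ≤ c' → c' < w →
      (pvGet2 inq r' c' false = true ↔ (r', c') ∈ q)) →
    (ds.foldl (pvPushD h w r c g1) (q, inq)).1.Nodup ∧
    (∀ p ∈ (ds.foldl (pvPushD h w r c g1) (q, inq)).1,
      0 ≤ p.1 ∧ p.1 < h ∧ 0 ≤ p.2 ∧ p.2 < w) ∧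
    Sh2 h w (ds.foldl (pvPushD h w r c g1) (q, inq)).2 ∧
    (∀ r' c', 0 ≤ r' → r' < h → 0 ≤ c' → c' < w →
      (pvGet2 (ds.foldl (pvPushD h w r c g1) (q, inq)).2 r' c' false = true ↔
        (r', c') ∈ (ds.foldl (pvPushD h w r c g1) (q, inq)).1)) ∧
    (∀ p ∈ q, p ∈ (ds.foldl (pvPushD h w r c g1) (q, inq)).1) ∧
    (ds.foldl (pvPushD h w r c g1) (q, inq)).1.length ≤ q.length + ds.length ∧
    (∀ d ∈ ds, (0 ≤ r + d.1 ∧ r + d.1 < h ∧ 0 ≤ c + d.2 ∧ c + d.2 < w ∧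
        pvGet2 g1 (r + d.1) (c + d.2) '.' = '@') →
      (r + d.1, c + d.2) ∈ (ds.foldl (pvPushD h w r c g1) (q, inq)).1) := by
  intro ds
  induction ds with
  | nil =>
    intro q inq hsub hnd hbd hsh hiff
    simp only [List.foldl_nil]
    exact ⟨hnd, hbd, hsh, hiff, fun p hp => hp, by simp, by simp⟩
  | cons d ds ih =>
    intro q inq hsub hnd hbd hsh hiff
    simp only [List.foldl_cons]
    have hd : d ∈ pvDirs := hsub d List.mem_cons_self
    have hsub' : ∀ d' ∈ ds, d' ∈ pvDirs := fun d' hd' => hsub d' (List.mem_cons_of_mem _ hd')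
    by_cases hg : (0 ≤ r + d.1 ∧ r + d.1 < h ∧ 0 ≤ c + d.2 ∧ c + d.2 < w ∧
        pvGet2 g1 (r + d.1) (c + d.2) '.' = '@')
    · by_cases hf : pvGet2 inq (r + d.1) (c + d.2) false = false
      · have hstep : pvPushD h w r c g1 (q, inq) d =
            (q ++ [(r + d.1, c + d.2)], pvSet2 inq (r + d.1) (c + d.2) true) := by
          simp [pvPushD, hg, hf]
        rw [hstep]
        have hnotin : (r + d.1, c + d.2) ∉ q := by
          intro hin
          have := (hiff _ _ hg.1 hg.2.1 hg.2.2.1 hg.2.2.2.1).mpr hin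
          simp [this] at hf
        have hnd' : (q ++ [(r + d.1, c + d.2)]).Nodup := by
          rw [List.nodup_append]
          refine ⟨hnd, List.nodup_singleton _, ?_⟩
          intro a ha b hb
          rw [List.mem_singleton] at hb
          subst hb
          intro he
          exact hnotin (he ▸ ha)
        have hbd' : ∀ p ∈ q ++ [(r + d.1, c + d.2)],
            0 ≤ p.1 ∧ p.1 < h ∧ 0 ≤ p.2 ∧ p.2 < w := by
          intro p hp
          rcases List.mem_append.mp hp with hp | hp
          · exact hbd p hp
          · simp only [List.mem_singleton] at hp
            subst hp
            exact ⟨hg.1, hg.2.1, hg.2.2.1, hg.2.2.2.1⟩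
        have hsh' : Sh2 h w (pvSet2 inq (r + d.1) (c + d.2) true) :=
          sh2_set2 hsh _ _ _ hg.1 hg.2.1
        have hiff' : ∀ r' c', 0 ≤ r' → r' < h → 0 ≤ c' → c' < w →
            (pvGet2 (pvSet2 inq (r + d.1) (c + d.2) true) r' c' false = true ↔
              (r', c') ∈ q ++ [(r + d.1, c + d.2)]) := by
          intro r' c' h1 h2 h3 h4
          rw [get2_set2 hsh true false hg.1 hg.2.1 hg.2.2.1 hg.2.2.2.1 h1 h2 h3 h4]
          by_cases he : r' = r + d.1 ∧ c' = c + d.2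
          · simp [he]
          · have hpne : (r', c') ≠ (r + d.1, c + d.2) := by
              intro hh
              exact he ⟨congrArg Prod.fst hh, congrArg Prod.snd hh⟩
            simp only [if_neg he, List.mem_append, List.mem_singleton]
            rw [hiff r' c' h1 h2 h3 h4]
            simp [hpne]
        have main := ih (q ++ [(r + d.1, c + d.2)]) _ hsub' hnd' hbd' hsh' hiff'
        refine ⟨main.1, main.2.1, main.2.2.1, main.2.2.2.1, ?_, ?_, ?_⟩
        · intro p hp
          exact main.2.2.2.2.1 p (List.mem_append_left _ hp)
        · have := main.2.2.2.2.2.1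
          simp only [List.length_append, List.length_cons, List.length_nil] at this ⊢
          omega
        · intro d' hd' hg'
          rcases List.mem_cons.mp hd' with rfl | hd''
          · exact main.2.2.2.2.1 _ (List.mem_append_right _ (List.mem_singleton.mpr rfl))
          · exact main.2.2.2.2.2.2 d' hd'' hg'
      · rw [Bool.not_eq_false] at hf
        have hstep : pvPushD h w r c g1 (q, inq) d = (q, inq) := by
          simp [pvPushD, hg, hf]
        rw [hstep]
        have main := ih q inq hsub' hnd hbd hsh hiff
        refine ⟨main.1, main.2.1, main.2.2.1, main.2.2.2.1, main.2.2.2.2.1, ?_, ?_⟩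
        · have := main.2.2.2.2.2.1
          simp only [List.length_cons] at this ⊢
          omega
        · intro d' hd' hg'
          rcases List.mem_cons.mp hd' with rfl | hd''
          · have hin : (r + d'.1, c + d'.2) ∈ q :=
              (hiff _ _ hg'.1 hg'.2.1 hg'.2.2.1 hg'.2.2.2.1).mp hf
            exact main.2.2.2.2.1 _ hin
          · exact main.2.2.2.2.2.2 d' hd'' hg'
    · have hstep : pvPushD h w r c g1 (q, inq) d = (q, inq) := by
        simp [pvPushD, hg]
      rw [hstep]
      have main := ih q inq hsub' hnd hbd hsh hiff
      refine ⟨main.1, main.2.1, main.2.2.1, main.2.2.2.1, main.2.2.2.2.1, ?_, ?_⟩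
      · have := main.2.2.2.2.2.1
        simp only [List.length_cons] at this ⊢
        omega
      · intro d' hd' hg'
        rcases List.mem_cons.mp hd' with rfl | hd''
        · exact absurd hg' hg
        · exact main.2.2.2.2.2.2 d' hd'' hg'

lemma loopA (h w : Int) : ∀ (fuel : Nat) (g : List (List Char)) (q : List (Int × Int))
    (inq : List (List Bool)) (removed : Int),
    Sh2 h w g → Sh2 h w inq → QInv h w g q inq →
    q.length + 9 * atN h w g < fuel →
    ∃ n, ReachG h w g n ∧ NormalG h w n ∧
      pvLoop h w fuel g q inq removed = removed + ((atN h w g : Int) - (atN h w n : Int)) := by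
  intro fuel
  induction fuel with
  | zero =>
    intro g q inq removed hs hsi hqi hpot
    exact absurd hpot (by omega)
  | succ fuel ih =>
    intro g q inq removed hs hsi hqi hpot
    obtain ⟨hnd, hbd, hiff, hrem⟩ := hqi
    cases q with
    | nil =>
      refine ⟨g, Relation.ReflTransGen.refl, ?_, ?_⟩
      · intro r c hr
        simpa using hrem r c hr
      · simp [pvLoop]
    | cons p q' =>
      obtain ⟨r, c⟩ := p
      have hb := hbd (r, c) List.mem_cons_self
      obtain ⟨hb1, hb2, hb3, hb4⟩ := hb
      simp only at hb1 hb2 hb3 hb4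
      have hndt := (List.nodup_cons.mp hnd).1
      have hnd' := (List.nodup_cons.mp hnd).2
      have hbd' : ∀ p ∈ q', 0 ≤ p.1 ∧ p.1 < h ∧ 0 ≤ p.2 ∧ p.2 < w :=
        fun p hp => hbd p (List.mem_cons_of_mem _ hp)
      have hsi1 : Sh2 h w (pvSet2 inq r c false) := sh2_set2 hsi _ _ _ hb1 hb2
      have hiff1 : ∀ r' c', 0 ≤ r' → r' < h → 0 ≤ c' → c' < w →
          (pvGet2 (pvSet2 inq r c false) r' c' false = true ↔ (r', c') ∈ q') := by
        intro r' c' h1 h2 h3 h4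
        rw [get2_set2 hsi false false hb1 hb2 hb3 hb4 h1 h2 h3 h4]
        by_cases he : r' = r ∧ c' = c
        · rw [if_pos he]
          constructor
          · intro hh
            exact absurd hh (by simp)
          · intro hh
            rw [he.1, he.2] at hh
            exact absurd hh hndt
        · rw [if_neg he]
          rw [hiff r' c' h1 h2 h3 h4]
          constructor
          · intro hh
            rcases List.mem_cons.mp hh with heq | hmem
            · exact absurd ⟨congrArg Prod.fst heq, congrArg Prod.snd heq⟩ he
            · exact hmem
          · exact fun hh => List.mem_cons_of_mem _ hh
      simp only [List.length_cons] at hpot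
      by_cases hat : pvGet2 g r c '.' = '@'
      · by_cases hadj : pvAdj g h w r c < 4
        · have hremP : RemP h w g r c := ⟨hb1, hb2, hb3, hb4, hat, hadj⟩
          have hstep : StepG h w g (pvSet2 g r c '.') := ⟨r, c, hremP, rfl⟩
          have hs1 := sh2_step hs hstep
          have hcnt := count_step hs hstep
          have main := push_fold (h := h) (w := w) (r := r) (c := c) (pvSet2 g r c '.')
            pvDirs q' (pvSet2 inq r c false) (fun d hd => hd) hnd' hbd' hsi1 hiff1
          have hrem' : ∀ rr cc, RemP h w (pvSet2 g r c '.') rr cc →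
              (rr, cc) ∈ (List.foldl (pvPushD h w r c (pvSet2 g r c '.'))
                (q', pvSet2 inq r c false) pvDirs).1 := by
            intro rr cc hr1
            by_cases hold : RemP h w g rr cc
            · rcases List.mem_cons.mp (hrem rr cc hold) with heq | hmem
              · exfalso
                have h1 : rr = r := congrArg Prod.fst heq
                have h2 : cc = c := congrArg Prod.snd heq
                have hcl := hr1.2.2.2.2.1
                rw [get2_set2 hs '.' '.' hb1 hb2 hb3 hb4 hr1.1 hr1.2.1 hr1.2.2.1
                  hr1.2.2.2.1] at hcl
                simp [h1, h2] at hcl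
              · exact main.2.2.2.2.1 _ hmem
            · have hcell : pvGet2 g rr cc '.' = '@' ∧ ¬(rr = r ∧ cc = c) := by
                have hcl := hr1.2.2.2.2.1
                rw [get2_set2 hs '.' '.' hb1 hb2 hb3 hb4 hr1.1 hr1.2.1 hr1.2.2.1
                  hr1.2.2.2.1] at hcl
                by_cases he : rr = r ∧ cc = c
                · simp [he] at hcl
                · exact ⟨by simpa [he] using hcl, he⟩
              have hadjge : ¬ (pvAdj g h w rr cc < 4) := fun hlt =>
                hold ⟨hr1.1, hr1.2.1, hr1.2.2.1, hr1.2.2.2.1, hcell.1, hlt⟩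
              have hnear : ¬ (∀ d ∈ pvDirs, (rr + d.1, cc + d.2) ≠ (r, c)) := by
                intro hfar
                have hac := adj_congr_far hs hb1 hb2 hb3 hb4 rr cc hfar
                exact hadjge (hac ▸ hr1.2.2.2.2.2)
              push Not at hnear
              obtain ⟨d, hdmem, hdeq⟩ := hnear
              have hd1 : rr + d.1 = r := congrArg Prod.fst hdeq
              have hd2 : cc + d.2 = c := congrArg Prod.snd hdeq
              have hdm' : ((-d.1, -d.2) : Int × Int) ∈ pvDirs := dirs_symm d hdmem
              have e1 : r + (-d.1) = rr := by omega
              have e2 : c + (-d.2) = cc := by omega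
              have hguard : 0 ≤ r + (-d.1, -d.2).1 ∧ r + (-d.1, -d.2).1 < h ∧
                  0 ≤ c + (-d.1, -d.2).2 ∧ c + (-d.1, -d.2).2 < w ∧
                  pvGet2 (pvSet2 g r c '.') (r + (-d.1, -d.2).1) (c + (-d.1, -d.2).2) '.' = '@' := by
                simp only
                rw [e1, e2]
                exact ⟨hr1.1, hr1.2.1, hr1.2.2.1, hr1.2.2.2.1, hr1.2.2.2.2.1⟩
              have hfin := main.2.2.2.2.2.2 _ hdm' hguard
              simp only at hfin
              rw [e1, e2] at hfin
              exact hfin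
          have hlen := main.2.2.2.2.2.1
          have hpot' : (List.foldl (pvPushD h w r c (pvSet2 g r c '.'))
              (q', pvSet2 inq r c false) pvDirs).1.length +
              9 * atN h w (pvSet2 g r c '.') < fuel := by
            have hdl : pvDirs.length = 8 := rfl
            omega
          obtain ⟨n, hreach, hnorm, hval⟩ := ih (pvSet2 g r c '.') _ _ (removed + 1)
            hs1 main.2.2.1 ⟨main.1, main.2.1, main.2.2.2.1, hrem'⟩ hpot'
          refine ⟨n, Relation.ReflTransGen.head hstep hreach, hnorm, ?_⟩
          have hcompute : pvLoop h w (fuel + 1) g ((r, c) :: q') inq removed =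
              pvLoop h w fuel (pvSet2 g r c '.')
                (List.foldl (pvPushD h w r c (pvSet2 g r c '.'))
                  (q', pvSet2 inq r c false) pvDirs).1
                (List.foldl (pvPushD h w r c (pvSet2 g r c '.'))
                  (q', pvSet2 inq r c false) pvDirs).2 (removed + 1) := by
            simp only [pvLoop]
            rw [if_neg (by simp [hat]), if_pos hadj]
          rw [hcompute, hval]
          omega
        · have hnoRem : ¬ RemP h w g r c := fun hr1 => hadj hr1.2.2.2.2.2
          have hrem' : ∀ rr cc, RemP h w g rr cc → (rr, cc) ∈ q' := by
            intro rr cc hr1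
            rcases List.mem_cons.mp (hrem rr cc hr1) with heq | hmem
            · exfalso
              apply hnoRem
              have h1 : rr = r := congrArg Prod.fst heq
              have h2 : cc = c := congrArg Prod.snd heq
              rwa [h1, h2] at hr1
            · exact hmem
          obtain ⟨n, hreach, hnorm, hval⟩ := ih g q' (pvSet2 inq r c false) removed
            hs hsi1 ⟨hnd', hbd', hiff1, hrem'⟩ (by omega)
          refine ⟨n, hreach, hnorm, ?_⟩
          rw [← hval]
          simp only [pvLoop]
          rw [if_neg (by simp [hat]), if_neg hadj]
      · have hnoRem : ¬ RemP h w g r c := fun hr1 => hat hr1.2.2.2.2.1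
        have hrem' : ∀ rr cc, RemP h w g rr cc → (rr, cc) ∈ q' := by
          intro rr cc hr1
          rcases List.mem_cons.mp (hrem rr cc hr1) with heq | hmem
          · exfalso
            apply hnoRem
            have h1 : rr = r := congrArg Prod.fst heq
            have h2 : cc = c := congrArg Prod.snd heq
            rwa [h1, h2] at hr1
          · exact hmem
        obtain ⟨n, hreach, hnorm, hval⟩ := ih g q' (pvSet2 inq r c false) removed
          hs hsi1 ⟨hnd', hbd', hiff1, hrem'⟩ (by omega)
        refine ⟨n, hreach, hnorm, ?_⟩
        rw [← hval]
        simp only [pvLoop]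
        rw [if_pos hat]

-- ---------- port B: sweep loop reaches the normal form ----------

lemma pyRange3 (a : Int) : PySem.List.pyRange (a - 1) (a + 2) 1 = [a - 1, a, a + 1] := by
  rw [PySem.List.pyRange_one_cons (by omega), PySem.List.pyRange_one_cons (by omega),
    PySem.List.pyRange_one_cons (by omega)]
  norm_num
  rw [show a + 1 + 1 = a + 2 from by ring]
  simp [pysem]

lemma altNbs_eq (g : List (List Char)) (h w r c : Int) :
    altNbs g h w r c = pvAdj g h w r c := by
  unfold altNbs pvAdj
  rw [pyRange3, pyRange3]
  simp only [pvDirs, List.foldl_cons, List.foldl_nil]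
  norm_num
  simp only [show r + -1 = r - 1 from by ring, show c + -1 = c - 1 from by ring]

lemma cols_spec (h w r : Int) (hr : 0 ≤ r) (hr2 : r < h) :
    ∀ (cs : List Int) (g : List (List Char)) (removed : Int) (changed : Bool),
    Sh2 h w g → (∀ c ∈ cs, 0 ≤ c ∧ c < w) →
    ∃ g' removed' changed',
      altCols h w r cs (g, removed, changed) = (g', removed', changed') ∧
      Sh2 h w g' ∧ ReachG h w g g' ∧
      removed' = removed + ((atN h w g : Int) - (atN h w g' : Int)) ∧
      (changed' = false → g' = g ∧ changed = false ∧ ∀ c ∈ cs, ¬ RemP h w g r c) ∧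
      (changed = false → changed' = true → atN h w g' < atN h w g) := by
  intro cs
  induction cs with
  | nil =>
    intro g removed changed hs hcs
    refine ⟨g, removed, changed, rfl, hs, Relation.ReflTransGen.refl, by omega, ?_, ?_⟩
    · intro hch
      exact ⟨rfl, hch, by simp⟩
    · intro h1 h2
      rw [h1] at h2
      exact absurd h2 (by simp)
  | cons c0 cs ih =>
    intro g removed changed hs hcs
    have hc0 := hcs c0 List.mem_cons_self
    have hcs' : ∀ c ∈ cs, 0 ≤ c ∧ c < w := fun c hc => hcs c (List.mem_cons_of_mem _ hc)
    by_cases hcond : pvGet2 g r c0 '.' = '@' ∧ altNbs g h w r c0 < 4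
    · have hremP : RemP h w g r c0 := ⟨hr, hr2, hc0.1, hc0.2, hcond.1, by
        rw [← altNbs_eq]; exact hcond.2⟩
      have hstep : StepG h w g (pvSet2 g r c0 '.') := ⟨r, c0, hremP, rfl⟩
      have hs1 := sh2_step hs hstep
      have hcnt := count_step hs hstep
      obtain ⟨g', removed', changed', heq, hs', hreach, hacc, hfalse, hstrict⟩ :=
        ih (pvSet2 g r c0 '.') (removed + 1) true hs1 hcs'
      refine ⟨g', removed', changed', ?_, hs', Relation.ReflTransGen.head hstep hreach,
        ?_, ?_, ?_⟩
      · simp only [altCols]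
        rw [if_pos hcond]
        exact heq
      · rw [hacc]
        omega
      · intro hch
        obtain ⟨_, htrue, _⟩ := hfalse hch
        exact absurd htrue (by simp)
      · intro h1 h2
        have hle := count_reach hreach hs1
        omega
    · obtain ⟨g', removed', changed', heq, hs', hreach, hacc, hfalse, hstrict⟩ :=
        ih g removed changed hs hcs'
      refine ⟨g', removed', changed', ?_, hs', hreach, hacc, ?_, hstrict⟩
      · simp only [altCols]
        rw [if_neg hcond]
        exact heq
      · intro hch
        obtain ⟨hg', hch0, hnorem⟩ := hfalse hch
        refine ⟨hg', hch0, ?_⟩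
        intro c hc
        rcases List.mem_cons.mp hc with rfl | hc'
        · intro hrem1
          exact hcond ⟨hrem1.2.2.2.2.1, by rw [altNbs_eq]; exact hrem1.2.2.2.2.2⟩
        · exact hnorem c hc'

lemma rows_spec (h w : Int) :
    ∀ (rs : List Int) (g : List (List Char)) (removed : Int) (changed : Bool),
    Sh2 h w g → (∀ r ∈ rs, 0 ≤ r ∧ r < h) →
    ∃ g' removed' changed',
      altRows h w rs (g, removed, changed) = (g', removed', changed') ∧
      Sh2 h w g' ∧ ReachG h w g g' ∧
      removed' = removed + ((atN h w g : Int) - (atN h w g' : Int)) ∧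
      (changed' = false → g' = g ∧ changed = false ∧
        ∀ r ∈ rs, ∀ c, 0 ≤ c → c < w → ¬ RemP h w g r c) ∧
      (changed = false → changed' = true → atN h w g' < atN h w g) := by
  intro rs
  induction rs with
  | nil =>
    intro g removed changed hs hrs
    refine ⟨g, removed, changed, rfl, hs, Relation.ReflTransGen.refl, by omega, ?_, ?_⟩
    · intro hch
      exact ⟨rfl, hch, by simp⟩
    · intro h1 h2
      rw [h1] at h2
      exact absurd h2 (by simp)
  | cons r0 rs ih =>
    intro g removed changed hs hrs
    have hr0 := hrs r0 List.mem_cons_self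
    obtain ⟨g1, rem1, ch1, heq1, hs1, hreach1, hacc1, hfalse1, hstrict1⟩ :=
      cols_spec h w r0 hr0.1 hr0.2 (PySem.List.pyRange 0 w 1) g removed changed hs
        (fun c hc => by rw [PySem.List.mem_pyRange_one] at hc; exact hc)
    obtain ⟨g', rem', ch', heq2, hs2, hreach2, hacc2, hfalse2, hstrict2⟩ :=
      ih g1 rem1 ch1 hs1 (fun rr hrr => hrs rr (List.mem_cons_of_mem _ hrr))
    refine ⟨g', rem', ch', ?_, hs2, Relation.ReflTransGen.trans hreach1 hreach2, ?_, ?_, ?_⟩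
    · simp only [altRows]
      rw [heq1]
      exact heq2
    · have c1 := count_reach hreach1 hs
      have c2 := count_reach hreach2 hs1
      omega
    · intro hch
      obtain ⟨hg2, hch1, hnorem2⟩ := hfalse2 hch
      obtain ⟨hg1, hch0, hnorem1⟩ := hfalse1 hch1
      refine ⟨by rw [hg2, hg1], hch0, ?_⟩
      intro rr hrr cc hc1 hc2
      rcases List.mem_cons.mp hrr with rfl | hrr'
      · exact hnorem1 cc (by rw [PySem.List.mem_pyRange_one]; exact ⟨hc1, hc2⟩)
      · have := hnorem2 rr hrr' cc hc1 hc2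
        rw [hg1] at this
        exact this
    · intro h1 h2
      by_cases hch1 : ch1 = true
      · have := hstrict1 h1 hch1
        have := count_reach hreach2 hs1
        omega
      · have hch1f : ch1 = false := by simpa using hch1
        obtain ⟨hg1, _, _⟩ := hfalse1 hch1f
        have := hstrict2 hch1f h2
        rw [hg1] at this
        exact this

lemma loopB (h w : Int) : ∀ (fuel : Nat) (g : List (List Char)) (removed : Int),
    Sh2 h w g → atN h w g < fuel →
    ∃ n, ReachG h w g n ∧ NormalG h w n ∧
      altLoop h w fuel g removed = removed + ((atN h w g : Int) - (atN h w n : Int)) := by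
  intro fuel
  induction fuel with
  | zero =>
    intro g removed hs hcnt
    exact absurd hcnt (by omega)
  | succ fuel ih =>
    intro g removed hs hcnt
    obtain ⟨g', rem', ch', heq, hs', hreach, hacc, hfalse, hstrict⟩ :=
      rows_spec h w (PySem.List.pyRange 0 h 1) g removed false hs
        (fun rr hrr => by rw [PySem.List.mem_pyRange_one] at hrr; exact hrr)
    by_cases hch : ch' = true
    · have hlt := hstrict rfl hch
      obtain ⟨n, hr2, hn2, hval⟩ := ih g' rem' hs' (by omega)
      refine ⟨n, Relation.ReflTransGen.trans hreach hr2, hn2, ?_⟩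
      have hcomp : altLoop h w (fuel + 1) g removed = altLoop h w fuel g' rem' := by
        simp only [altLoop]
        rw [heq]
        simp [hch]
      rw [hcomp, hval, hacc]
      have := count_reach hreach hs
      omega
    · have hchf : ch' = false := by simpa using hch
      obtain ⟨hg, _, hnorem⟩ := hfalse hchf
      have hnorm : NormalG h w g := by
        intro rr cc hrem1
        exact hnorem rr (by rw [PySem.List.mem_pyRange_one]; exact ⟨hrem1.1, hrem1.2.1⟩)
          cc hrem1.2.2.1 hrem1.2.2.2.1 hrem1
      refine ⟨g, Relation.ReflTransGen.refl, hnorm, ?_⟩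
      have hcomp : altLoop h w (fuel + 1) g removed = rem' := by
        simp only [altLoop]
        rw [heq]
        simp [hchf]
      rw [hcomp, hacc, hg]

-- ---------- initial state ----------

lemma filterMap_if_eq {α β : Type} (F : α → β) (P : α → Prop) [DecidablePred P]
    (l : List α) :
    l.filterMap (fun a => if P a then some (F a) else none) =
      (l.filter (fun a => decide (P a))).map F := by
  induction l with
  | nil => rfl
  | cons a l ih =>
    by_cases hp : P a
    · simp [hp, ih]
    · simp [hp, ih]

lemma flatMap_filter {α β : Type} (f : α → List β) (p : β → Bool) (l : List α) :
    (l.flatMap f).filter p = l.flatMap (fun a => (f a).filter p) := by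
  induction l with
  | nil => rfl
  | cons a l ih => simp [List.flatMap_cons, List.filter_append, ih]

lemma initQ_eq_filter (g : List (List Char)) (h w : Int) (hh : 0 ≤ h) (hw : 0 ≤ w) :
    pvInitQ g h w = (cellsL h w).filter (fun p => pvGet2 g p.1 p.2 '.' == '@') := by
  have hR : PySem.List.pyRange 0 h 1 = (List.range h.toNat).map (fun n : Nat => (n : Int)) := by
    conv_lhs => rw [show h = ((h.toNat : Nat) : Int) from by omega]
    exact PySem.List.pyRange_zero_natCast _
  have hW : PySem.List.pyRange 0 w 1 = (List.range w.toNat).map (fun n : Nat => (n : Int)) := by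
    conv_lhs => rw [show w = ((w.toNat : Nat) : Int) from by omega]
    exact PySem.List.pyRange_zero_natCast _
  unfold pvInitQ cellsL
  rw [hR, hW]
  rw [flatMap_filter]
  rw [List.flatMap_map]
  congr 1
  funext r
  rw [List.filterMap_map]
  simp only [Function.comp_def]
  rw [filterMap_if_eq (fun c : Nat => ((r : Int), (c : Int)))
    (fun c : Nat => pvGet2 g (r : Int) (c : Int) '.' = '@')]
  rw [List.filter_map]
  congr 1

lemma mem_initQ {g : List (List Char)} {h w : Int} (hh : 0 ≤ h) (hw : 0 ≤ w) {p : Int × Int} :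
    p ∈ pvInitQ g h w ↔ (0 ≤ p.1 ∧ p.1 < h ∧ 0 ≤ p.2 ∧ p.2 < w ∧
      pvGet2 g p.1 p.2 '.' = '@') := by
  rw [initQ_eq_filter g h w hh hw]
  rw [List.mem_filter]
  rw [mem_cellsL]
  simp [and_assoc]

lemma nodup_initQ (g : List (List Char)) (h w : Int) (hh : 0 ≤ h) (hw : 0 ≤ w) :
    (pvInitQ g h w).Nodup := by
  rw [initQ_eq_filter g h w hh hw]
  exact (nodup_cellsL h w).filter _

lemma length_initQ (g : List (List Char)) (h w : Int) (hh : 0 ≤ h) (hw : 0 ≤ w) :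
    (pvInitQ g h w).length = atN h w g := by
  rw [initQ_eq_filter g h w hh hw]
  unfold atN
  rw [List.countP_eq_length_filter]

lemma sh2_initInq (g : List (List Char)) (h w : Int) (hh : 0 ≤ h) (hw : 0 ≤ w) :
    Sh2 h w (pvInitInq g h w) := by
  unfold pvInitInq
  constructor
  · conv_lhs => rw [show h = ((h.toNat : Nat) : Int) from by omega,
      PySem.List.pyRange_zero_natCast]
    simp
  · intro row hrow
    rw [List.mem_map] at hrow
    obtain ⟨r, _, rfl⟩ := hrow
    conv_rhs => rw [show w = ((w.toNat : Nat) : Int) from by omega,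
      PySem.List.pyRange_zero_natCast]
    simp

lemma get2_initInq (g : List (List Char)) (h w : Int) {r c : Int}
    (hr : 0 ≤ r) (hr2 : r < h) (hc : 0 ≤ c) (hc2 : c < w) :
    pvGet2 (pvInitInq g h w) r c false = (pvGet2 g r c '.' == '@') := by
  unfold pvInitInq pvGet2
  rw [PySem.List.pyGetD_map_pyRange_of_nonneg _ h r [] hr hr2,
    PySem.List.pyGetD_map_pyRange_of_nonneg _ w c false hc hc2]


-- ===== VERDICT (by name: the statement is the Claim_ definition above) =====
theorem solve_spec : Claim_equal_solve := by
  intro text hdom hpre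
  unfold Pre_solve at hpre
  unfold Spec_solve
  simp only [solve, solve_alt, altGrid, pvGrid]
  set L := (PySem.Chars.splitlines text.toList).filter
    (fun l => !(PySem.Chars.strip l).isEmpty) with hLdef
  set H := PySem.List.len L with hHdef
  set W := if H ≠ 0 then PySem.List.len (PySem.List.pyGetD L 0 []) else 0 with hWdef
  have hH : H = (L.length : Int) := by rw [hHdef]; simp [PySem.List.len_eq]
  have hH0 : 0 ≤ H := by rw [hH]; positivity
  have hW0 : 0 ≤ W := by
    rw [hWdef]
    split_ifs
    · simp [PySem.List.len_eq]
    · exact le_refl 0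
  have hsh : Sh2 H W L := by
    constructor
    · rw [hH]; simp
    · intro row hrow
      by_cases hnil : L = []
      · rw [hnil] at hrow
        simp at hrow
      · obtain ⟨l0, ls, hL0⟩ := List.exists_cons_of_ne_nil hnil
        have hne : H ≠ 0 := by
          rw [hH, hL0]
          simp
          omega
        have hWv : W = (l0.length : Int) := by
          rw [hWdef, if_pos hne, hL0]
          simp [PySem.List.len_eq, PySem.List.pyGetD_zero_cons]
        have hp := hpre row hrow
        rw [hL0] at hp
        simp only [List.headD_cons] at hp
        omega
  have hqinv : QInv H W L (pvInitQ L H W) (pvInitInq L H W) := by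
    refine ⟨nodup_initQ L H W hH0 hW0, ?_, ?_, ?_⟩
    · intro p hp
      have := (mem_initQ hH0 hW0).mp hp
      exact ⟨this.1, this.2.1, this.2.2.1, this.2.2.2.1⟩
    · intro r c h1 h2 h3 h4
      rw [get2_initInq L H W h1 h2 h3 h4]
      rw [mem_initQ hH0 hW0]
      simp [h1, h2, h3, h4, beq_iff_eq]
    · intro r c hrem
      rw [mem_initQ hH0 hW0]
      exact ⟨hrem.1, hrem.2.1, hrem.2.2.1, hrem.2.2.2.1, hrem.2.2.2.2.1⟩
  have hlen := length_initQ L H W hH0 hW0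
  obtain ⟨n1, hr1, hn1, hv1⟩ := loopA H W (10 * (pvInitQ L H W).length + 1) L
    (pvInitQ L H W) (pvInitInq L H W) 0 hsh (sh2_initInq L H W hH0 hW0) hqinv (by omega)
  obtain ⟨n2, hr2, hn2, hv2⟩ := loopB H W (H.toNat * W.toNat + 1) L 0 hsh
    (by have := count_le H W L; omega)
  have hnn := nf_unique H W (atN H W L) L n1 n2 hsh (le_refl _) hr1 hn1 hr2 hn2
  rw [hv1, hv2, hnn]
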